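-- pv_equiv track=rewrite | github.com/kg233/projects | python projects/project 4 - Final/mechanics.py | _empty_infront
-- ===== SOURCE A (Python) =====
-- def _empty_infront(column: 'column', ) -> 'column':
--     '''move the block forward in a column if the index after it is three white space'''
--     index = len(column) - 1
--     if column[index] == '   ':
--         column = [column[index]] + column[0:index]
--         index -= 1
--     while index >= 1:
--         if column[index] == '   ':
--             column = [column[index]] + column[0:index] + column[index + 1:]
--         index -= 1
--     return column
-- ===== SOURCE B (Python) =====
-- def _empty_infront(column: 'column', ) -> 'column':
--     '''move every empty block to the front of the column, keeping the other
--     blocks in their original order (stable partition in one pass)'''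
--     empty = '   '
--     empties = column.count(empty)
--     blocks = [block for block in column if block != empty]
--     return [empty] * empties + blocks
-- ===== Notes on version B (the rewrite author's own statement) =====
-- stated objective: simpler
-- what changed: A scans indices right-to-left and repeatedly rebuilds the whole list to move each empty block to the front; B is a one-pass stable partition (count the empties, keep the other blocks in order).
-- intended difference: On columns with two adjacent ' ' blocks somewhere after a non-empty block, A's index arithmetic skips the element before each moved block and so leaves at least one empty block stuck behind a non-empty one, while B moves every empty block to the front, which is the function's stated purpose; the tightness theorem proves they differ on every such column. — e.g. on _empty_infront(["x", " ", " "]): A returns [" ", "x", " "], B returns [" ", " ", "x"]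
import Mathlib
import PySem

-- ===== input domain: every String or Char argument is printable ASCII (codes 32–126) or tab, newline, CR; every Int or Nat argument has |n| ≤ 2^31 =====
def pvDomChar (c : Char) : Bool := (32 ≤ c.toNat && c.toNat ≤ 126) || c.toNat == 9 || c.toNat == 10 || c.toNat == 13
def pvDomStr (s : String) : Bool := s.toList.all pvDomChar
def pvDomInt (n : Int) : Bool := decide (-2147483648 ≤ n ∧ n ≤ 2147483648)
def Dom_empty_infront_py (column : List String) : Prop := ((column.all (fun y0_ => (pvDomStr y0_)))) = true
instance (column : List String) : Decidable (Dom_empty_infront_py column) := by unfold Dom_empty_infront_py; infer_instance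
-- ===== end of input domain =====

-- B re-implements A's repeated move-to-front list rebuilding as a one-pass stable partition;
-- outside D_ (adjacent empty blocks after a non-empty block) the return values agree.

def pvE : String := "   "

-- ===== PORT A =====
-- while index >= 1: if column[index] == '   ': column = [column[index]] + column[0:index] + column[index+1:]; index -= 1
def loopA : List String → Nat → List String
  | column, 0 => column
  | column, i + 1 =>
    let column' :=
      if PySem.List.pyGet? column ((i : Int) + 1) = some pvE then
        pvE :: (PySem.List.slice column (some 0) (some ((i : Int) + 1)) ++
                PySem.List.slice column (some ((i : Int) + 2)) none)
      else column
    loopA column' i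

def empty_infront_py (column : List String) : List String :=
  match PySem.List.pyGet? column ((column.length : Int) - 1) with
  | none => []   -- IndexError (column == []), excluded by Pre_
  | some v =>
    if v = pvE then
      loopA (v :: PySem.List.slice column (some 0) (some ((column.length : Int) - 1)))
        (column.length - 2)
    else
      loopA column (column.length - 1)

-- ===== PORT B =====
def empty_infront_py_alt (column : List String) : List String :=
  let empties := PySem.List.count column pvE
  let blocks := column.filter (fun block => block != pvE)
  List.replicate empties pvE ++ blocks

-- ===== PRECONDITION & SPEC =====
-- A evaluates column[len(column)-1] first, which raises IndexError exactly on the empty list.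
def Pre_empty_infront_py (column : List String) : Prop := column ≠ []
instance (column : List String) : Decidable (Pre_empty_infront_py column) := by
  unfold Pre_empty_infront_py; infer_instance

def pvWitness_empty_infront_py : List String := ["a"]

-- two adjacent '   ' blocks somewhere in the list
def pvAdjEE : List String → Bool
  | a :: b :: r => (a == pvE && b == pvE) || pvAdjEE (b :: r)
  | _ => false

-- On columns with two adjacent '   ' blocks somewhere after a non-empty block, A's index
-- arithmetic skips the element before each moved block and leaves some empty blocks stuck
-- behind non-empty ones; B moves every empty block to the front, the function's stated purpose.
def D_empty_infront_py (column : List String) : Prop :=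
  pvAdjEE (column.dropWhile (fun b => b = pvE)) = true
instance (column : List String) : Decidable (D_empty_infront_py column) := by
  unfold D_empty_infront_py; infer_instance

def Spec_empty_infront_py (column : List String) (out : List String) : Prop :=
  ¬ D_empty_infront_py column → out = empty_infront_py_alt column
instance (column : List String) (out : List String) : Decidable (Spec_empty_infront_py column out) := by
  unfold Spec_empty_infront_py; infer_instance

def pvDiffWitness_empty_infront_py : List String := ["x", "   ", "   "]
def pvDiffWitnessOut_empty_infront_py : (List String) × (List String) :=
  (["   ", "x", "   "], ["   ", "   ", "x"])

-- ===== CLAIM =====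
def Claim_unchanged_empty_infront_py : Prop :=
  ∀ (column : List String), Dom_empty_infront_py column → Pre_empty_infront_py column →
    Spec_empty_infront_py column (empty_infront_py column)
def Claim_changed_empty_infront_py : Prop :=
  Dom_empty_infront_py (pvDiffWitness_empty_infront_py) ∧
  Pre_empty_infront_py (pvDiffWitness_empty_infront_py) ∧
  D_empty_infront_py (pvDiffWitness_empty_infront_py) ∧
  empty_infront_py (pvDiffWitness_empty_infront_py) = pvDiffWitnessOut_empty_infront_py.1 ∧
  empty_infront_py_alt (pvDiffWitness_empty_infront_py) = pvDiffWitnessOut_empty_infront_py.2 ∧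
  pvDiffWitnessOut_empty_infront_py.1 ≠ pvDiffWitnessOut_empty_infront_py.2
def Claim_exact_empty_infront_py : Prop :=
  ∀ (column : List String), Dom_empty_infront_py column → Pre_empty_infront_py column →
    D_empty_infront_py column → empty_infront_py column ≠ empty_infront_py_alt column
-- ===== LEMMAS AND PROOFS =====

-- 'no adjacent pair of empties' as a chain predicate
lemma pvAdjEE_false_iff (l : List String) :
    pvAdjEE l = false ↔ l.IsChain (fun a b => a ≠ pvE ∨ b ≠ pvE) := by
  induction l with
  | nil => exact iff_of_true rfl List.isChain_nil
  | cons a l ih =>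
    cases l with
    | nil => exact iff_of_true rfl (List.isChain_singleton a)
    | cons b r =>
      rw [List.isChain_cons_cons, ← ih]
      simp [pvAdjEE]
      tauto

-- the loop is the identity while the pointer is inside the leading block of empties
lemma loopA_noop (i : Nat) : ∀ (f : Nat) (d : List String), i < f →
    loopA (List.replicate f pvE ++ d) i = List.replicate f pvE ++ d := by
  induction i with
  | zero => intro f d _; rfl
  | succ i ih =>
    intro f d hif
    show loopA _ i = _
    have hcast : ((i : Int) + 1) = ((i + 1 : Nat) : Int) := by push_cast; ring
    have hget : PySem.List.pyGet? (List.replicate f pvE ++ d) ((i : Int) + 1) = some pvE := by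
      rw [hcast, PySem.List.pyGet?_natCast,
        List.getElem?_append_left (by simpa using hif), List.getElem?_replicate]
      simp [hif]
    rw [hget, if_pos rfl]
    have hslice1 : PySem.List.slice (List.replicate f pvE ++ d) (some 0) (some ((i : Int) + 1))
        = List.replicate (i + 1) pvE := by
      rw [hcast, PySem.List.slice_zero_start, PySem.List.slice_to_natCast,
        List.take_append_of_le_length (by simpa using Nat.le_of_lt hif), List.take_replicate,
        Nat.min_eq_left (Nat.le_of_lt hif)]
    have hcast2 : ((i : Int) + 2) = ((i + 2 : Nat) : Int) := by push_cast; ring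
    have hslice2 : PySem.List.slice (List.replicate f pvE ++ d) (some ((i : Int) + 2)) none
        = List.replicate (f - (i + 2)) pvE ++ d := by
      rw [hcast2, PySem.List.slice_from_natCast, List.drop_append_of_le_length (by simpa using hif),
        List.drop_replicate]
    rw [hslice1, hslice2]
    have : pvE :: (List.replicate (i + 1) pvE ++ (List.replicate (f - (i + 2)) pvE ++ d))
        = List.replicate f pvE ++ d := by
      rw [← List.cons_append, ← List.replicate_succ, ← List.append_assoc, ← List.replicate_add]
      congr 2
      omega
    rw [this]
    exact ih f d (Nat.lt_of_succ_lt hif)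

-- the element at the loop pointer
lemma getmid (f : Nat) (s : List String) (x : String) (d : List String) :
    (List.replicate f pvE ++ (s ++ x :: d))[f + s.length]? = some x := by
  rw [List.getElem?_append_right (by simp)]
  simp

-- the working list's two slices at the pointer
lemma takemid (f : Nat) (s : List String) (x : String) (d : List String) :
    (List.replicate f pvE ++ (s ++ x :: d)).take (f + s.length)
      = List.replicate f pvE ++ s := by
  have h : List.replicate f pvE ++ (s ++ x :: d) = (List.replicate f pvE ++ s) ++ (x :: d) := by
    simp
  rw [h, List.take_append_of_le_length (by simp), List.take_of_length_le (by simp)]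

lemma dropmid (f : Nat) (s : List String) (x : String) (d : List String) :
    (List.replicate f pvE ++ (s ++ x :: d)).drop (f + s.length + 1) = d := by
  have h : List.replicate f pvE ++ (s ++ x :: d) = (List.replicate f pvE ++ s) ++ (x :: d) := by
    simp
  rw [h]
  have hl : f + s.length + 1 = (List.replicate f pvE ++ s).length + 1 := by simp
  rw [hl, ← List.drop_drop, List.drop_left]
  rfl

-- the effect of A's loop on the suffix right of the leading empties: each found empty goes
-- to the front and the element just before it is skipped (gA takes the suffix REVERSED and
-- returns (number of empties moved to the front, surviving elements in original order))
def gA : List String → Nat × List String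
  | [] => (0, [])
  | [x] => if x = pvE then (1, []) else (0, [x])
  | x :: y :: r =>
    if x = pvE then ((gA r).1 + 1, (gA r).2 ++ [y])
    else ((gA (y :: r)).1, (gA (y :: r)).2 ++ [x])

lemma gA_cons_nonE (x : String) (rs : List String) (hx : ¬ x = pvE) :
    gA (x :: rs) = ((gA rs).1, (gA rs).2 ++ [x]) := by
  cases rs with
  | nil => simp [gA, hx]
  | cons y r => simp [gA, hx]

-- general loop characterisation (no assumption on the suffix t)
lemma loopA_general : ∀ (n : Nat) (t : List String), t.length ≤ n → ∀ (f : Nat) (d : List String),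
    loopA (List.replicate f pvE ++ (t ++ d)) (f + t.length - 1)
      = List.replicate (f + (gA t.reverse).1) pvE ++ ((gA t.reverse).2 ++ d) := by
  intro n
  induction n with
  | zero =>
    intro t ht f d
    have : t = [] := List.eq_nil_of_length_eq_zero (Nat.le_zero.mp ht)
    subst this
    simp only [List.reverse_nil, gA, List.nil_append, Nat.add_zero, List.length_nil]
    rcases Nat.eq_zero_or_pos f with hf | hf
    · subst hf; rfl
    · exact loopA_noop (f + 0 - 1) f d (by omega)
  | succ n ih =>
    intro t ht f d
    rcases List.eq_nil_or_concat t with rfl | ⟨s, x, hu⟩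
    · simp only [List.reverse_nil, gA, List.nil_append, Nat.add_zero, List.length_nil]
      rcases Nat.eq_zero_or_pos f with hf | hf
      · subst hf; rfl
      · exact loopA_noop (f + 0 - 1) f d (by omega)
    · rw [List.concat_eq_append] at hu
      subst hu
      have hrev : (s ++ [x]).reverse = x :: s.reverse := by simp
      have hlens : s.length ≤ n := by simp at ht; omega
      have hshape : List.replicate f pvE ++ ((s ++ [x]) ++ d)
          = List.replicate f pvE ++ (s ++ x :: d) := by simp
      have hlen : (s ++ [x]).length = s.length + 1 := by simp
      rcases Nat.eq_zero_or_pos (f + s.length) with h0 | hpos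
      · -- pointer 0: loop does not run; forces f = 0, s = []
        have hf : f = 0 := by omega
        have hs : s = [] := List.eq_nil_of_length_eq_zero (by omega)
        subst hf; subst hs
        by_cases hx : x = pvE
        · subst hx; simp [loopA, gA]
        · simp [loopA, gA, hx]
      · obtain ⟨m, hm⟩ : ∃ m, f + s.length = m + 1 := ⟨f + s.length - 1, by omega⟩
        have hidx : f + (s ++ [x]).length - 1 = m + 1 := by omega
        rw [hshape, hidx]
        simp only [loopA]
        have hcast : ((m : Int) + 1) = ((m + 1 : Nat) : Int) := by push_cast; ring
        have hget : PySem.List.pyGet? (List.replicate f pvE ++ (s ++ x :: d)) ((m : Int) + 1)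
            = some x := by
          rw [hcast, PySem.List.pyGet?_natCast, ← hm, getmid]
        rw [hget]
        by_cases hx : x = pvE
        · -- x is moved to the front; the pointer skips the element before it
          rw [if_pos (by rw [hx])]
          have hs1 : PySem.List.slice (List.replicate f pvE ++ (s ++ x :: d)) (some 0)
              (some ((m : Int) + 1)) = List.replicate f pvE ++ s := by
            rw [hcast, PySem.List.slice_zero_start, PySem.List.slice_to_natCast, ← hm, takemid]
          have hcast2 : ((m : Int) + 2) = ((m + 2 : Nat) : Int) := by push_cast; ring
          have hs2 : PySem.List.slice (List.replicate f pvE ++ (s ++ x :: d))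
              (some ((m : Int) + 2)) none = d := by
            rw [hcast2, PySem.List.slice_from_natCast]
            have h2 : m + 2 = f + s.length + 1 := by omega
            rw [h2, dropmid]
          rw [hs1, hs2]
          have hcol : pvE :: ((List.replicate f pvE ++ s) ++ d)
              = List.replicate (f + 1) pvE ++ (s ++ d) := by
            simp [List.replicate_succ, List.append_assoc]
          rw [hcol]
          rcases List.eq_nil_or_concat s with rfl | ⟨s', y, hu2⟩
          · -- s = []: pointer dives into the leading block, loop is a no-op
            have hf : f = m + 1 := by simpa using hm
            subst hf
            simp only [List.nil_append]
            rw [loopA_noop m (m + 1 + 1) d (by omega)]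
            subst hx
            simp [gA, List.replicate_succ']
          · rw [List.concat_eq_append] at hu2
            subst hu2
            have hm' : m = (f + 1) + s'.length - 1 := by
              have : (s' ++ [y]).length = s'.length + 1 := by simp
              omega
            have hcol2 : List.replicate (f + 1) pvE ++ ((s' ++ [y]) ++ d)
                = List.replicate (f + 1) pvE ++ (s' ++ y :: d) := by simp
            rw [hcol2, hm', ih s' (by simp at hlens; omega) (f + 1) (y :: d)]
            subst hx
            have hrev2 : ((s' ++ [y]) ++ [pvE]).reverse = pvE :: y :: s'.reverse := by simp
            rw [hrev2]
            simp only [gA, if_pos rfl]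
            have harith : f + 1 + (gA s'.reverse).1 = f + ((gA s'.reverse).1 + 1) := by omega
            rw [harith]
            simp [List.append_assoc]
        · -- x stays: pointer just moves left
          rw [if_neg (by simpa using hx)]
          have hm2 : m = f + s.length - 1 := by omega
          have hcol : List.replicate f pvE ++ (s ++ x :: d)
              = List.replicate f pvE ++ (s ++ (x :: d)) := by simp
          rw [hcol, hm2, ih s hlens f (x :: d), hrev, gA_cons_nonE x s.reverse hx]
          simp [List.append_assoc]

-- full characterisation of A on a column split as (k leading empties) ++ t
lemma A_char (k : Nat) (t : List String) (hne : k + t.length ≠ 0) :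
    empty_infront_py (List.replicate k pvE ++ t)
      = List.replicate (k + (gA t.reverse).1) pvE ++ (gA t.reverse).2 := by
  rcases List.eq_nil_or_concat t with rfl | ⟨u, z, hu⟩
  · -- the whole column is empties
    rw [List.append_nil]
    have hk1 : 1 ≤ k := by simp at hne; omega
    have hcast : (((List.replicate k pvE).length : Int)) - 1 = ((k - 1 : Nat) : Int) := by
      simp; omega
    have hget : PySem.List.pyGet? (List.replicate k pvE)
        (((List.replicate k pvE).length : Int) - 1) = some pvE := by
      rw [hcast, PySem.List.pyGet?_natCast, List.getElem?_replicate]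
      simp; omega
    unfold empty_infront_py
    rw [hget]
    dsimp only
    rw [if_pos rfl]
    have hslice : PySem.List.slice (List.replicate k pvE) (some 0)
        (some (((List.replicate k pvE).length : Int) - 1)) = List.replicate (k - 1) pvE := by
      rw [hcast, PySem.List.slice_zero_start, PySem.List.slice_to_natCast,
        List.take_replicate, Nat.min_eq_left (by omega)]
    rw [hslice]
    have hcol : pvE :: List.replicate (k - 1) pvE = List.replicate k pvE ++ [] := by
      rw [← List.replicate_succ, List.append_nil]
      congr 1; omega
    rw [hcol, loopA_noop ((List.replicate k pvE).length - 2) k [] (by simp; omega)]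
    simp [gA]
  · rw [List.concat_eq_append] at hu
    subst hu
    have hlen2 : (List.replicate k pvE ++ (u ++ [z])).length = k + u.length + 1 := by
      simp
      omega
    have hcast : (((List.replicate k pvE ++ (u ++ [z])).length : Int)) - 1
        = ((k + u.length : Nat) : Int) := by rw [hlen2]; push_cast; ring
    have hget : PySem.List.pyGet? (List.replicate k pvE ++ (u ++ [z]))
        (((List.replicate k pvE ++ (u ++ [z])).length : Int) - 1) = some z := by
      rw [hcast, PySem.List.pyGet?_natCast]
      have h : u ++ [z] = u ++ z :: [] := by simp
      rw [h, getmid]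
    unfold empty_infront_py
    rw [hget]
    dsimp only
    by_cases hz : z = pvE
    · -- last block is empty: A first rotates it to the front (skipping the element before)
      rw [if_pos hz]
      have hslice : PySem.List.slice (List.replicate k pvE ++ (u ++ [z])) (some 0)
          (some (((List.replicate k pvE ++ (u ++ [z])).length : Int) - 1))
          = List.replicate k pvE ++ u := by
        rw [hcast, PySem.List.slice_zero_start, PySem.List.slice_to_natCast]
        have h : u ++ [z] = u ++ z :: [] := by simp
        rw [h, takemid]
      rw [hslice]
      rcases List.eq_nil_or_concat u with rfl | ⟨u', y, hu2⟩
      · -- u = []: the rotated column is all empties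
        have hcol : z :: (List.replicate k pvE ++ []) = List.replicate (k + 1) pvE ++ [] := by
          rw [hz]
          simp [List.replicate_succ]
        have hno : loopA (List.replicate (k + 1) pvE ++ ([] : List String))
            ((List.replicate k pvE ++ ([] ++ [z])).length - 2)
            = List.replicate (k + 1) pvE ++ [] :=
          loopA_noop _ (k + 1) [] (by simp)
        rw [hcol]
        rw [hno]
        subst hz
        simp [gA]
      · rw [List.concat_eq_append] at hu2
        subst hu2
        have hcol : z :: (List.replicate k pvE ++ (u' ++ [y]))
            = List.replicate (k + 1) pvE ++ (u' ++ y :: []) := by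
          rw [hz]
          simp [List.replicate_succ]
        have hidx : (List.replicate k pvE ++ ((u' ++ [y]) ++ [z])).length - 2
            = (k + 1) + u'.length - 1 := by simp; omega
        rw [hidx, hcol, loopA_general u'.length u' le_rfl (k + 1) [y]]
        subst hz
        have hrev : ((u' ++ [y]) ++ [pvE]).reverse = pvE :: y :: u'.reverse := by simp
        rw [hrev]
        simp only [gA, if_pos rfl]
        have harith : k + 1 + (gA u'.reverse).1 = k + ((gA u'.reverse).1 + 1) := by omega
        rw [harith]
        simp [List.append_assoc]
    · -- last block is not empty: the loop runs over the whole column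
      rw [if_neg hz]
      have hcol : List.replicate k pvE ++ (u ++ [z])
          = List.replicate k pvE ++ ((u ++ [z]) ++ []) := by simp
      have hidx : (List.replicate k pvE ++ (u ++ [z])).length - 1
          = k + (u ++ [z]).length - 1 := by simp
      rw [hidx]
      conv_lhs => rw [hcol]
      rw [loopA_general (u ++ [z]).length (u ++ [z]) le_rfl k []]
      simp

-- on a suffix with no two adjacent empties, gA is the stable partition (count, filter)
lemma gA_chain : ∀ (n : Nat) (t : List String), t.length ≤ n →
    t.IsChain (fun a b => a ≠ pvE ∨ b ≠ pvE) →
    gA t.reverse = (t.count pvE, t.filter (fun b => b != pvE)) := by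
  intro n
  induction n with
  | zero =>
    intro t ht _
    have : t = [] := List.eq_nil_of_length_eq_zero (Nat.le_zero.mp ht)
    subst this
    simp [gA]
  | succ n ih =>
    intro t ht hch
    rcases List.eq_nil_or_concat t with rfl | ⟨s, x, hu⟩
    · simp [gA]
    · rw [List.concat_eq_append] at hu
      subst hu
      have hlens : s.length ≤ n := by simp at ht; omega
      obtain ⟨hchs, -, hlastX⟩ := List.isChain_append.mp hch
      have hrev : (s ++ [x]).reverse = x :: s.reverse := by simp
      by_cases hx : x = pvE
      · subst hx
        rcases List.eq_nil_or_concat s with rfl | ⟨s', y, hu2⟩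
        · simp [gA]
        · rw [List.concat_eq_append] at hu2
          subst hu2
          have hy : y ≠ pvE := by
            rcases hlastX y (by simp) pvE (by simp) with h | h
            · exact h
            · exact absurd rfl h
          have hrev2 : ((s' ++ [y]) ++ [pvE]).reverse = pvE :: y :: s'.reverse := by simp
          rw [hrev2]
          simp only [gA, if_pos rfl]
          rw [ih s' (by simp at hlens; omega) hchs.left_of_append]
          have hcy : List.count pvE [y] = 0 := by simp [hy]
          have hcz : List.count pvE [pvE] = 1 := by simp
          have hfy : List.filter (fun b => b != pvE) [y] = [y] := by simp [hy]
          have hfz : List.filter (fun b => b != pvE) [pvE] = [] := by simp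
          rw [List.count_append, List.count_append, List.filter_append, List.filter_append,
            hcy, hcz, hfy, hfz]
          simp
      · rw [hrev, gA_cons_nonE x s.reverse hx, ih s hlens hchs]
        have hcx : List.count pvE [x] = 0 := by simp [hx]
        have hfx : List.filter (fun b => b != pvE) [x] = [x] := by simp [hx]
        rw [List.count_append, List.filter_append, hcx, hfx]
        simp

-- 'missB w' : w contains an empty block somewhere after a non-empty block
def missB : List String → Bool
  | [] => false
  | a :: r => if a = pvE then missB r else decide (0 < r.count pvE)

lemma missB_append_left (w v : List String) (h : missB w = true) : missB (w ++ v) = true := by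
  induction w with
  | nil => simp [missB] at h
  | cons a r ih =>
    simp only [List.cons_append, missB] at h ⊢
    by_cases ha : a = pvE
    · rw [if_pos ha] at h ⊢
      exact ih h
    · rw [if_neg ha] at h ⊢
      simp only [decide_eq_true_eq] at h ⊢
      rw [List.count_append]
      omega

lemma missB_of_mem (w v : List String) (a : String) (ha : a ∈ w) (hne : a ≠ pvE) :
    missB (w ++ pvE :: v) = true := by
  induction w with
  | nil => simp at ha
  | cons b r ih =>
    simp only [List.cons_append, missB]
    by_cases hb : b = pvE
    · rw [if_pos hb]
      have har : a ∈ r := by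
        rcases List.mem_cons.mp ha with h | h
        · exact absurd (h.trans hb) hne
        · exact h
      exact ih har
    · rw [if_neg hb]
      simp [List.count_append]

lemma missB_replicate (K : Nat) (w : List String) :
    missB (List.replicate K pvE ++ w) = missB w := by
  induction K with
  | zero => simp
  | succ K ih =>
    rw [List.replicate_succ, List.cons_append]
    simp [missB, ih]

lemma missB_of_no_empty (w : List String) (h : ∀ a ∈ w, a ≠ pvE) : missB w = false := by
  cases w with
  | nil => rfl
  | cons a r =>
    have ha : a ≠ pvE := h a (by simp)
    have hr : pvE ∉ r := fun hm => h pvE (List.mem_cons_of_mem a hm) rfl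
    simp only [missB]
    rw [if_neg ha, List.count_eq_zero.mpr hr]
    simp

-- every non-empty element of the scanned suffix survives in gA's remainder
lemma gA_mem : ∀ (n : Nat) (rs : List String), rs.length ≤ n →
    ∀ (a : String), a ∈ rs → a ≠ pvE → a ∈ (gA rs).2 := by
  intro n
  induction n with
  | zero =>
    intro rs hl a ha _
    have : rs = [] := List.eq_nil_of_length_eq_zero (Nat.le_zero.mp hl)
    subst this
    simp at ha
  | succ n ih =>
    intro rs hl a ha hne
    cases rs with
    | nil => simp at ha
    | cons x rest =>
      cases rest with
      | nil =>
        by_cases hx : x = pvE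
        · simp at ha
          exact absurd (ha.trans hx) hne
        · simp [gA, hx] at ha ⊢
          exact ha
      | cons y r =>
        by_cases hx : x = pvE
        · simp only [gA, if_pos hx]
          rcases List.mem_cons.mp ha with h | h
          · exact absurd (h.trans hx) hne
          · rcases List.mem_cons.mp h with h2 | h2
            · simp [h2]
            · have := ih r (by simp at hl; omega) a h2 hne
              simp [this]
        · simp only [gA, if_neg hx]
          rcases List.mem_cons.mp ha with h | h
          · simp [h]
          · have := ih (y :: r) (by simp only [List.length_cons] at hl ⊢; omega) a h hne
            simp [this]

-- adjacency pattern under append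
lemma pvAdjEE_append (w v : List String) :
    pvAdjEE (w ++ v) = true ↔
      pvAdjEE w = true ∨ pvAdjEE v = true ∨ (w.getLast? = some pvE ∧ v.head? = some pvE) := by
  induction w with
  | nil => simp [pvAdjEE]
  | cons a w ih =>
    cases w with
    | nil =>
      cases v with
      | nil => simp [pvAdjEE]
      | cons b r =>
        simp [pvAdjEE]
        tauto
    | cons b w' =>
      have hl : (a :: b :: w').getLast? = (b :: w').getLast? := by
        rw [List.getLast?_cons_cons]
      simp only [List.cons_append, pvAdjEE, Bool.or_eq_true, ih, hl]
      tauto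

-- if the scanned suffix has two adjacent empties after a non-empty block, gA's remainder
-- keeps an empty block behind a non-empty one
lemma gA_miss : ∀ (n : Nat) (t : List String), t.length ≤ n →
    pvAdjEE (t.dropWhile (fun b => b = pvE)) = true → missB ((gA t.reverse).2) = true := by
  intro n
  induction n with
  | zero =>
    intro t ht hadj
    have : t = [] := List.eq_nil_of_length_eq_zero (Nat.le_zero.mp ht)
    subst this
    simp [pvAdjEE] at hadj
  | succ n ih =>
    intro t ht hadj
    rcases List.eq_nil_or_concat t with rfl | ⟨s, x, hu⟩
    · simp [pvAdjEE] at hadj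
    · rw [List.concat_eq_append] at hu
      subst hu
      have hlens : s.length ≤ n := by simp at ht; omega
      have hrev : (s ++ [x]).reverse = x :: s.reverse := by simp
      rw [List.dropWhile_append] at hadj
      by_cases hall : (List.dropWhile (fun b => decide (b = pvE)) s).isEmpty = true
      · -- s is all empties: the dropped list is inside [x], no adjacent pair
        rw [if_pos hall] at hadj
        exfalso
        cases hdx : List.dropWhile (fun b => decide (b = pvE)) [x] with
        | nil => rw [hdx] at hadj; simp [pvAdjEE] at hadj
        | cons c cs =>
          have : cs = [] := by
            have := congrArg List.length hdx
            simp at this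
            cases cs with
            | nil => rfl
            | cons d ds =>
              simp [List.dropWhile] at hdx
              split at hdx <;> simp_all
          rw [hdx, this] at hadj
          simp [pvAdjEE] at hadj
      · rw [if_neg hall] at hadj
        by_cases hx : x = pvE
        · subst hx
          rcases List.eq_nil_or_concat s with rfl | ⟨s', y, hu2⟩
          · simp [List.dropWhile] at hall
          · rw [List.concat_eq_append] at hu2
            subst hu2
            have hrev2 : ((s' ++ [y]) ++ [pvE]).reverse = pvE :: y :: s'.reverse := by simp
            rw [hrev2]
            simp only [gA, if_pos rfl]
            by_cases hy : y = pvE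
            · -- the adjacent pair is (y, x); some non-empty block sits before it in s'
              subst hy
              have hex : ∃ a ∈ s', a ≠ pvE := by
                by_contra hno
                push_neg at hno
                apply hall
                rw [List.isEmpty_iff, List.dropWhile_eq_nil_iff]
                intro a ha
                simp only [decide_eq_true_eq]
                rcases List.mem_append.mp ha with h | h
                · exact hno a h
                · simp at h; exact h
              obtain ⟨a, haMem, haNe⟩ := hex
              have haRes : a ∈ (gA s'.reverse).2 :=
                gA_mem s'.reverse.length s'.reverse le_rfl a (by simp [haMem]) haNe
              have := missB_of_mem (gA s'.reverse).2 [] a haRes haNe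
              simpa using this
            · -- the adjacent pair lies inside s'
              have hadj' : pvAdjEE (s'.dropWhile (fun b => b = pvE)) = true := by
                rw [List.dropWhile_append] at hadj
                by_cases hall' : (List.dropWhile (fun b => decide (b = pvE)) s').isEmpty = true
                · exfalso
                  rw [if_pos hall'] at hadj
                  have hdy : List.dropWhile (fun b => decide (b = pvE)) [y] = [y] := by
                    simp [List.dropWhile, hy]
                  rw [hdy] at hadj
                  rcases (pvAdjEE_append [y] [pvE]).mp hadj with h | h | h
                  · simp [pvAdjEE] at h
                  · simp [pvAdjEE] at h
                  · simp at h
                    exact hy h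
                · rw [if_neg hall'] at hadj
                  rcases (pvAdjEE_append (List.dropWhile (fun b => decide (b = pvE)) s' ++ [y])
                      [pvE]).mp hadj with h | h | h
                  · rcases (pvAdjEE_append (List.dropWhile (fun b => decide (b = pvE)) s')
                        [y]).mp h with h2 | h2 | h2
                    · exact h2
                    · simp [pvAdjEE] at h2
                    · exfalso
                      simp at h2
                      exact hy h2.2
                  · simp [pvAdjEE] at h
                  · exfalso
                    have := h.1
                    simp [List.getLast?_append] at this
                    exact hy this
              have hmr := ih s' (by simp at hlens; omega) hadj'
              exact missB_append_left _ [y] hmr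
        · -- x stays at the end of the remainder; the pattern lies to its left
          have hadj' : pvAdjEE (s.dropWhile (fun b => b = pvE)) = true := by
            rcases (pvAdjEE_append (List.dropWhile (fun b => decide (b = pvE)) s) [x]).mp hadj
              with h | h | h
            · exact h
            · simp [pvAdjEE] at h
            · exfalso
              simp at h
              exact hx h.2
          rw [hrev, gA_cons_nonE x s.reverse hx]
          exact missB_append_left _ [x] (ih s hlens hadj')

-- the column splits into its leading empties and a remainder
lemma takeWhile_replicate (column : List String) :
    column.takeWhile (fun b => b = pvE)
      = List.replicate (column.takeWhile (fun b => b = pvE)).length pvE := by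
  apply List.eq_replicate_of_mem
  intro b hb
  have := List.mem_takeWhile_imp hb
  simpa using this

lemma split_column (cs : List String) :
    cs = List.replicate (cs.takeWhile (fun b => b = pvE)).length pvE
      ++ cs.dropWhile (fun b => b = pvE) := by
  conv_lhs => rw [← List.takeWhile_append_dropWhile (p := fun b => decide (b = pvE)) (l := cs)]
  rw [← takeWhile_replicate]

lemma split_column_ne (cs : List String) (hne : cs ≠ []) :
    (cs.takeWhile (fun b => b = pvE)).length + (cs.dropWhile (fun b => b = pvE)).length ≠ 0 := by
  intro h
  apply hne
  rw [split_column cs]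
  have h1 : (cs.takeWhile (fun b => b = pvE)).length = 0 := by omega
  have h2 : (cs.dropWhile (fun b => b = pvE)).length = 0 := by omega
  rw [h1, List.replicate_zero, List.nil_append]
  exact List.eq_nil_of_length_eq_zero h2

-- B's value on the split column
lemma alt_split (k : Nat) (t : List String) :
    empty_infront_py_alt (List.replicate k pvE ++ t)
      = List.replicate (k + t.count pvE) pvE ++ t.filter (fun b => b != pvE) := by
  unfold empty_infront_py_alt
  rw [PySem.List.count_eq]
  simp only [List.count_append, List.filter_append, List.count_replicate,
    List.filter_replicate]
  simp

lemma empty_infront_eq (cs : List String) (hne : cs ≠ [])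
    (hD : ¬ D_empty_infront_py cs) : empty_infront_py cs = empty_infront_py_alt cs := by
  unfold D_empty_infront_py at hD
  rw [Bool.not_eq_true] at hD
  have hch := (pvAdjEE_false_iff _).mp hD
  have hne2 := split_column_ne cs hne
  conv_lhs => rw [split_column cs]
  conv_rhs => rw [split_column cs]
  rw [A_char _ _ hne2, alt_split,
    gA_chain (cs.dropWhile (fun b => b = pvE)).length _ le_rfl hch]

-- dropWhile is idempotent on the remainder
lemma dropWhile_drop (cs : List String) :
    (cs.dropWhile (fun b => b = pvE)).dropWhile (fun b => b = pvE)
      = cs.dropWhile (fun b => b = pvE) := by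
  cases h : cs.dropWhile (fun b => decide (b = pvE)) with
  | nil => rfl
  | cons a r =>
    have ha : ¬ (a = pvE) := by
      have := List.head?_dropWhile_not (fun b => decide (b = pvE)) cs
      rw [h] at this
      simpa using this
    simp [List.dropWhile, ha]

lemma empty_infront_ne (cs : List String) (hne : cs ≠ [])
    (hD : D_empty_infront_py cs) : empty_infront_py cs ≠ empty_infront_py_alt cs := by
  unfold D_empty_infront_py at hD
  have hne2 := split_column_ne cs hne
  have hmissA : missB (empty_infront_py cs) = true := by
    conv_lhs => rw [split_column cs]
    rw [A_char _ _ hne2, missB_replicate]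
    exact gA_miss (cs.dropWhile (fun b => b = pvE)).length _ le_rfl
      (by rw [dropWhile_drop]; exact hD)
  have hmissB : missB (empty_infront_py_alt cs) = false := by
    conv_lhs => rw [split_column cs]
    rw [alt_split, missB_replicate]
    apply missB_of_no_empty
    intro a ha
    have := List.of_mem_filter ha
    simpa using this
  intro h
  rw [h, hmissB] at hmissA
  exact Bool.false_ne_true hmissA

-- ===== VERDICT =====
theorem empty_infront_py_spec : Claim_unchanged_empty_infront_py := by
  intro column _ hpre hD
  exact empty_infront_eq column hpre hD

theorem empty_infront_py_changed : Claim_changed_empty_infront_py := by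
  unfold Claim_changed_empty_infront_py; decide

theorem empty_infront_py_tight : Claim_exact_empty_infront_py := by
  intro column _ hpre hD
  exact empty_infront_ne column hpre hD
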